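-- pv_equiv track=rewrite | github.com/ashapochka/saapy | saapy/contrib/analysis_support1.py | group_files_by_category
-- ===== SOURCE A (Python) =====
-- from collections import OrderedDict
--
-- def group_files_by_category(files, categories):
--     file_groups = OrderedDict([(c, []) for c in categories])
--     file_groups['other_category'] = []
--     for f in files:
--         for category in categories:
--             if f.startswith(categories[category]):
--                 file_groups[category].append(f)
--                 break
--         else:
--             file_groups['other_category'].append(f)
--     return file_groups
-- ===== SOURCE B (Python) =====
-- from collections import OrderedDict
--
--
-- def group_files_by_category(files, categories):
--     # Inverted prefix index: map each prefix to the smallest index of a category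
--     # carrying it, then classify each file by looking up each of its prefixes
--     # once (O(F*L + C*L)) instead of scanning every category per file.
--     groups = OrderedDict((c, []) for c in categories)
--     groups['other_category'] = []
--     pref_index = {}
--     for i, c in enumerate(categories):
--         pref_index.setdefault(categories[c], i)
--     maxlen = max(map(len, pref_index), default=0)
--     cats = list(categories)
--     for f in files:
--         best = None
--         for k in range(min(len(f), maxlen) + 1):
--             j = pref_index.get(f[:k])
--             if j is not None and (best is None or j < best):
--                 best = j
--         groups[cats[best] if best is not None else 'other_category'].append(f)
--     return groups
-- ===== Notes on version B (the rewrite author's own statement) =====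
-- stated objective: faster
-- what changed: Replaces the per-file scan over all categories by an inverted index (dict from prefix string to smallest category index) consulted once per prefix of each file, so per-file work no longer depends on the number of categories.
import Mathlib
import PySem

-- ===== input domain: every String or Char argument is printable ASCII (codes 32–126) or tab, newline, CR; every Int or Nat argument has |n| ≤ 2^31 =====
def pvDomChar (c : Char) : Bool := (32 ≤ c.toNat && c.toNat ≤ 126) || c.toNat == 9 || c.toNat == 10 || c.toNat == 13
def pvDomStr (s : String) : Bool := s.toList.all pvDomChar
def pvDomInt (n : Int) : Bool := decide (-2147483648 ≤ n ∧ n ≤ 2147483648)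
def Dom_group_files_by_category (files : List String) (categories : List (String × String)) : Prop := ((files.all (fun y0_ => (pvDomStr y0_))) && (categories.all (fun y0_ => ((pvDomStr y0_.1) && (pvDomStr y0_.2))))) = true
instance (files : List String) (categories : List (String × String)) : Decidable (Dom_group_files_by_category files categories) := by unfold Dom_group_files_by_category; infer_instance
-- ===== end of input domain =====

/-
B replaces A's per-file linear scan over all categories by an inverted index from
prefix string to the smallest category index, consulted once for every prefix of
each file; both fill the same grouping dict (objective: faster in a timing run).
-/

-- ===== PORT A =====
def group_files_by_category (files : List String) (categories : List (String × String)) : List (String × List String) :=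
  -- file_groups = OrderedDict([(c, []) for c in categories]); categories is a dict,
  -- iterated as its (key, prefix) pairs per the association-list convention
  let fg0 : PySem.Dict String (List String) :=
    PySem.Dict.ofList (categories.map (fun c => (c.1, ([] : List String))))
  let fg1 := fg0.insert "other_category" []
  -- for f in files: for category in categories: if f.startswith(categories[category]): … break / else: …
  let fg2 := files.foldl (fun fg f =>
      match categories.find? (fun c => PySem.Str.startswith f c.2) with
      | some c => fg.modify c.1 [] (fun l => l ++ [f])
      | none   => fg.modify "other_category" [] (fun l => l ++ [f])) fg1
  fg2.items

-- ===== PORT B =====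
def group_files_by_category_alt (files : List String) (categories : List (String × String)) : List (String × List String) :=
  -- groups = OrderedDict((c, []) for c in categories); groups['other_category'] = []
  let g0 : PySem.Dict String (List String) :=
    PySem.Dict.ofList (categories.map (fun c => (c.1, ([] : List String))))
  let g1 := g0.insert "other_category" []
  -- pref_index = {}; for i, c in enumerate(categories): pref_index.setdefault(categories[c], i)
  let prefIndex : PySem.Dict String Int :=
    (PySem.List.enumerate categories).foldl (fun d ic => d.setdefault ic.2.2 ic.1) PySem.Dict.empty
  -- maxlen = max(map(len, pref_index), default=0)
  let maxlen : Int :=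
    match PySem.List.max? prefIndex.keys (fun p => PySem.Str.len p) with
    | some p => PySem.Str.len p
    | none => 0
  let cats := categories.map (fun c => c.1)
  -- per file: find smallest indexed category over all prefixes, then append
  let g2 := files.foldl (fun g f =>
      let best : Option Int :=
        (PySem.List.pyRange 0 (min (PySem.Str.len f) maxlen + 1)).foldl (fun best k =>
          match prefIndex.get? (PySem.Str.slice f none (some k)) with
          | some j =>
            match best with
            | none => some j
            | some b => if j < b then some j else some b
          | none => best) none
      -- groups[cats[best] if best is not None else 'other_category'].append(f)
      let key : String :=
        match best with
        | some j =>
          match PySem.List.pyGet? cats j with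
          | some s => s
          | none => ""   -- IndexError; unreachable: best is always a valid index into cats
        | none => "other_category"
      g.modify key [] (fun l => l ++ [f])) g1
  g2.items

-- ===== PRECONDITION & SPEC =====
def Spec_group_files_by_category (files : List String) (categories : List (String × String)) (out : List (String × List String)) : Prop := out = group_files_by_category_alt files categories
instance (files : List String) (categories : List (String × String)) (out : List (String × List String)) : Decidable (Spec_group_files_by_category files categories out) := by unfold Spec_group_files_by_category; infer_instance

-- ===== CLAIM (what is proved, stated in full; the proofs are below) =====
def Claim_equal_group_files_by_category : Prop := ∀ (files : List String) (categories : List (String × String)), Dom_group_files_by_category files categories → Spec_group_files_by_category files categories (group_files_by_category files categories)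

-- ===== LEMMAS AND PROOFS =====

-- the index of the first category whose prefix matches f (shared reference spec)
def pvChoice (categories : List (String × String)) (f : String) : Option Nat :=
  categories.findIdx? (fun c => PySem.Str.startswith f c.2)

-- the key A appends f to
def pvKeyOf (categories : List (String × String)) (f : String) : String :=
  match categories.find? (fun c => PySem.Str.startswith f c.2) with
  | some c => c.1
  | none => "other_category"

-- ---- generic small lemmas ----

theorem pv_findIdx?_some_iff {α : Type} (l : List α) (q : α → Bool) (i : Nat) :
    l.findIdx? q = some i ↔
      ∃ h : i < l.length, q l[i] = true ∧ ∀ j (hj : j < i), q (l[j]'(by omega)) = false := by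
  rw [List.findIdx?_eq_some_iff_findIdx_eq]
  constructor
  · rintro ⟨hlen, rfl⟩
    refine ⟨hlen, List.findIdx_getElem, fun j hj => ?_⟩
    exact List.not_of_lt_findIdx hj
  · rintro ⟨hlen, hqi, hmin⟩
    refine ⟨hlen, ?_⟩
    have h1 : l.findIdx q ≤ i := by
      by_contra hc
      have h3 := List.not_of_lt_findIdx (p := q) (xs := l) (show i < l.findIdx q by omega)
      exact (by simp : ¬(true = false)) (hqi.symm.trans h3)
    have h2 : ¬ l.findIdx q < i := by
      intro hlt
      have hw : l.findIdx q < l.length := by omega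
      have h3 : q (l[l.findIdx q]'hw) = true := List.findIdx_getElem
      exact (by simp : ¬(false = true)) ((hmin _ hlt).symm.trans h3)
    omega

theorem pv_findIdx?_le {α : Type} (l : List α) (q : α → Bool) (i : Nat) (h : i < l.length)
    (hq : q l[i] = true) : ∃ j, l.findIdx? q = some j ∧ j ≤ i := by
  have hle : l.findIdx q ≤ i := by
    by_contra hc
    have h3 := List.not_of_lt_findIdx (p := q) (xs := l) (show i < l.findIdx q by omega)
    exact (by simp : ¬(true = false)) (hq.symm.trans h3)
  refine ⟨l.findIdx q, ?_, hle⟩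
  rw [List.findIdx?_eq_some_iff_findIdx_eq]
  exact ⟨by omega, rfl⟩

theorem pv_find?_eq_findIdx? {α : Type} (l : List α) (q : α → Bool) :
    l.find? q = (l.findIdx? q).bind (fun i => l[i]?) := by
  induction l with
  | nil => simp
  | cons x t ih =>
      by_cases hq : q x
      · simp [List.findIdx?_cons, hq]
      · simp only [List.find?_cons, List.findIdx?_cons, hq, if_neg, Bool.false_eq_true,
          not_false_eq_true]
        rw [ih]
        cases t.findIdx? q <;> simp

theorem pv_choice_lt (categories : List (String × String)) (f : String) (i : Nat)
    (h : pvChoice categories f = some i) : i < categories.length := by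
  rcases (pv_findIdx?_some_iff _ _ _).1 h with ⟨hlen, _, _⟩; exact hlen

-- minimum fold = List.min?
theorem pv_foldl_min_eq_min? {β : Type} (g : β → Option Int) (l : List β) :
    l.foldl (fun best k =>
        match g k with
        | some j => match best with
                    | none => some j
                    | some b => if j < b then some j else some b
        | none => best) none
      = (l.filterMap g).min? := by
  have aux : ∀ (t : List β) (b : Int),
      t.foldl (fun best k =>
        match g k with
        | some j => match best with
                    | none => some j
                    | some b => if j < b then some j else some b
        | none => best) (some b)
      = some ((t.filterMap g).foldl min b) := by
    intro t
    induction t with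
    | nil => intro b; rfl
    | cons k t ih =>
        intro b
        simp only [List.foldl_cons, List.filterMap_cons]
        cases hg : g k with
        | none => exact ih b
        | some j =>
            have : (if j < b then some j else some b) = some (min b j) := by
              split <;> simp <;> omega
            simp only [this, List.foldl_cons, ih]
  induction l with
  | nil => rfl
  | cons k t ih =>
      simp only [List.foldl_cons, List.filterMap_cons]
      cases hg : g k with
      | none => exact ih
      | some j => rw [aux, List.min?_cons']

-- ---- B-side characterisations ----

-- the inverted index maps p to the first category index whose prefix is exactly p
theorem pv_prefIndex_get? (categories : List (String × String)) (p : String) :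
    ((PySem.List.enumerate categories).foldl (fun d ic => d.setdefault ic.2.2 ic.1)
        (PySem.Dict.empty : PySem.Dict String Int)).get? p
      = (categories.findIdx? (fun c => c.2 == p)).map (fun i : Nat => (i : Int)) := by
  have aux : ∀ (l : List (String × String)) (s : Int) (d : PySem.Dict String Int),
      ((PySem.List.enumerate l s).foldl (fun d ic => d.setdefault ic.2.2 ic.1) d).get? p
        = match d.get? p with
          | some v => some v
          | none => (l.findIdx? (fun c => c.2 == p)).map (fun i : Nat => s + (i : Int)) := by
    intro l
    induction l with
    | nil => intro s d; cases h : d.get? p <;> simp [PySem.List.enumerate_nil, h]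
    | cons c t ih =>
        intro s d
        rw [PySem.List.enumerate_cons]
        simp only [List.foldl_cons]
        by_cases hq : c.2 = p
        · subst hq
          rw [ih]
          rw [show (d.setdefault c.2 s).get? c.2 = some ((d.get? c.2).getD s) from
            PySem.Dict.get?_setdefault_self d c.2 s]
          cases h : d.get? c.2 <;> simp [List.findIdx?_cons]
        · rw [ih]
          rw [PySem.Dict.get?_setdefault_of_ne d s (fun h => hq h.symm)]
          cases h : d.get? p with
          | some v => simp
          | none =>
              simp only [List.findIdx?_cons, show (c.2 == p) = false by simp [hq], if_neg,
                Bool.false_eq_true, not_false_eq_true]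
              cases t.findIdx? (fun c => c.2 == p) <;> simp <;> push_cast <;> ring
  rw [aux]
  simp only [PySem.Dict.get?_empty]
  cases categories.findIdx? (fun c => c.2 == p) <;> simp

-- ---- named views of B's inner computations (definitionally equal to the port's lets) ----

def pvPrefIndex (categories : List (String × String)) : PySem.Dict String Int :=
  (PySem.List.enumerate categories).foldl (fun d ic => d.setdefault ic.2.2 ic.1) PySem.Dict.empty

def pvMaxlen (categories : List (String × String)) : Int :=
  match PySem.List.max? (pvPrefIndex categories).keys (fun p => PySem.Str.len p) with
  | some p => PySem.Str.len p
  | none => 0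

def pvBest (categories : List (String × String)) (f : String) : Option Int :=
  (PySem.List.pyRange 0 (min (PySem.Str.len f) (pvMaxlen categories) + 1)).foldl (fun best k =>
    match (pvPrefIndex categories).get? (PySem.Str.slice f none (some k)) with
    | some j =>
      match best with
      | none => some j
      | some b => if j < b then some j else some b
    | none => best) none

def pvKeyB (categories : List (String × String)) (f : String) : String :=
  match pvBest categories f with
  | some j =>
    match PySem.List.pyGet? (categories.map (fun c => c.1)) j with
    | some s => s
    | none => ""
  | none => "other_category"

theorem pv_maxlen_ge (categories : List (String × String)) (p : String) (j : Int)
    (h : (pvPrefIndex categories).get? p = some j) : PySem.Str.len p ≤ pvMaxlen categories := by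
  have hmem : p ∈ (pvPrefIndex categories).keys := by
    by_contra hc
    rw [(PySem.Dict.get?_eq_none_iff_not_mem_keys _ _).2 hc] at h
    cases h
  unfold pvMaxlen
  cases hmax : PySem.List.max? (pvPrefIndex categories).keys (fun p => PySem.Str.len p) with
  | none =>
      rw [PySem.List.max?_eq_none_iff] at hmax
      rw [hmax] at hmem
      cases hmem
  | some q => exact PySem.List.max?_isMax hmax p hmem

-- the inner fold over all prefixes of f finds the first matching category
theorem pv_best_eq_choice (categories : List (String × String)) (f : String) :
    pvBest categories f = (pvChoice categories f).map (fun i : Nat => (i : Int)) := by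
  unfold pvBest
  rw [pv_foldl_min_eq_min? (fun k => (pvPrefIndex categories).get? (PySem.Str.slice f none (some k)))
    (PySem.List.pyRange 0 (min (PySem.Str.len f) (pvMaxlen categories) + 1))]
  have hgp : ∀ (p : String) (j : Int), (pvPrefIndex categories).get? p = some j ↔
      ∃ jn : Nat, categories.findIdx? (fun c => c.2 == p) = some jn ∧ j = (jn : Int) := by
    intro p j
    unfold pvPrefIndex
    rw [pv_prefIndex_get?]
    cases h : categories.findIdx? (fun c => c.2 == p) <;> simp [eq_comm]
  have hsw : ∀ (c : String × String), PySem.Str.startswith f c.2 = true ↔ c.2.toList <+: f.toList := by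
    intro c
    rw [PySem.Str.startswith_eq]
    exact PySem.Chars.startswith_iff _ _
  have hslice : ∀ k : Int, 0 ≤ k → (PySem.Str.slice f none (some k)).toList = f.toList.take k.toNat := by
    intro k hk
    rw [PySem.Str.toList_slice]
    exact PySem.List.slice_to _ hk
  have hmatch : ∀ (k : Int), k ∈ PySem.List.pyRange 0 (min (PySem.Str.len f) (pvMaxlen categories) + 1) →
      ∀ j, (pvPrefIndex categories).get? (PySem.Str.slice f none (some k)) = some j →
      ∃ jn : Nat, j = (jn : Int) ∧ ∃ hjn : jn < categories.length,
        PySem.Str.startswith f ((categories[jn]'hjn).2) = true := by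
    intro k hk j hg
    obtain ⟨jn, hfi, rfl⟩ := (hgp _ _).1 hg
    obtain ⟨hlen, hq, _⟩ := (pv_findIdx?_some_iff _ _ _).1 hfi
    have hp : (categories[jn]'hlen).2 = PySem.Str.slice f none (some k) := by simpa using hq
    have hk0 := PySem.List.mem_pyRange_one.1 hk
    have hkf : k ≤ PySem.Str.len f := by
      rcases le_total (PySem.Str.len f) (pvMaxlen categories) with h | h <;> omega
    have hpre : (categories[jn]'hlen).2.toList <+: f.toList := by
      rw [hp, hslice k hk0.1]
      exact List.take_prefix _ _
    exact ⟨jn, rfl, hlen, (hsw _).2 hpre⟩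
  cases hc : pvChoice categories f with
  | none =>
      have hnone := List.findIdx?_eq_none_iff.1 hc
      have hempty : (PySem.List.pyRange 0 (min (PySem.Str.len f) (pvMaxlen categories) + 1)).filterMap
          (fun k => (pvPrefIndex categories).get? (PySem.Str.slice f none (some k))) = [] := by
        rw [List.filterMap_eq_nil_iff]
        intro k hk
        cases hg : (pvPrefIndex categories).get? (PySem.Str.slice f none (some k)) with
        | none => rfl
        | some j =>
            exfalso
            obtain ⟨jn, rfl, hjn, hswn⟩ := hmatch k hk j hg
            have hfalse := hnone (categories[jn]'hjn) (List.getElem_mem hjn)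
            exact (by simp : ¬(true = false)) (hswn.symm.trans hfalse)
      rw [hempty]
      rfl
  | some i0 =>
      obtain ⟨hlen0, hq0, hmin0⟩ := (pv_findIdx?_some_iff _ _ _).1 hc
      simp only [Option.map_some]
      rw [List.min?_eq_some_iff]
      have hpre0 : (categories[i0]'hlen0).2.toList <+: f.toList := (hsw _).1 hq0
      constructor
      · -- ↑i0 is among the looked-up indices: take k = len(prefix of category i0)
        have hfi : categories.findIdx? (fun c => c.2 == (categories[i0]'hlen0).2) = some i0 := by
          obtain ⟨j', hj', hle⟩ := pv_findIdx?_le categories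
            (fun c => c.2 == (categories[i0]'hlen0).2) i0 hlen0 (by simp)
          obtain ⟨hl', hq', _⟩ := (pv_findIdx?_some_iff _ _ _).1 hj'
          have hp' : (categories[j']'hl').2 = (categories[i0]'hlen0).2 := by simpa using hq'
          rcases Nat.lt_or_ge j' i0 with hlt | hge
          · exfalso
            have hf' := hmin0 j' hlt
            have ht' : PySem.Str.startswith f ((categories[j']'hl').2) = true :=
              (hsw _).2 (hp' ▸ hpre0)
            exact (by simp : ¬(true = false)) (ht'.symm.trans hf')
          · have hj0 : j' = i0 := le_antisymm hle hge
            subst hj0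
            exact hj'
        have hget : (pvPrefIndex categories).get? ((categories[i0]'hlen0).2) = some (i0 : Int) :=
          (hgp _ _).2 ⟨i0, hfi, rfl⟩
        have hlenle : ((categories[i0]'hlen0).2.toList.length : Int) ≤ PySem.Str.len f := by
          rw [PySem.Str.len_eq]
          exact_mod_cast hpre0.length_le
        have hlenml : ((categories[i0]'hlen0).2.toList.length : Int) ≤ pvMaxlen categories := by
          have := pv_maxlen_ge categories _ _ hget
          rwa [PySem.Str.len_eq] at this
        have hk0mem : ((categories[i0]'hlen0).2.toList.length : Int)
            ∈ PySem.List.pyRange 0 (min (PySem.Str.len f) (pvMaxlen categories) + 1) := by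
          refine PySem.List.mem_pyRange_one.2 ⟨Int.natCast_nonneg _, ?_⟩
          rcases le_total (PySem.Str.len f) (pvMaxlen categories) with h | h <;> omega
        have hsl : PySem.Str.slice f none (some ((categories[i0]'hlen0).2.toList.length : Int))
            = (categories[i0]'hlen0).2 := by
          apply String.ext
          rw [hslice _ (Int.natCast_nonneg _)]
          rw [Int.toNat_natCast]
          exact ((List.prefix_iff_eq_take.1 hpre0)).symm
        refine List.mem_filterMap.2 ⟨_, hk0mem, ?_⟩
        rw [hsl]
        exact hget
      · -- every looked-up index matches, so it is ≥ the first matching one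
        intro b hb
        obtain ⟨k, hk, hg⟩ := List.mem_filterMap.1 hb
        obtain ⟨jn, rfl, hjn, hswn⟩ := hmatch k hk b hg
        have hle : i0 ≤ jn := by
          by_contra hlt
          have hf' := hmin0 jn (by omega)
          exact (by simp : ¬(true = false)) (hswn.symm.trans hf')
        exact_mod_cast hle

-- the key A chooses, expressed through pvChoice
theorem pv_keyOf_choice_none (categories : List (String × String)) (f : String)
    (h : pvChoice categories f = none) : pvKeyOf categories f = "other_category" := by
  unfold pvKeyOf
  rw [pv_find?_eq_findIdx?]
  unfold pvChoice at h
  rw [h]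
  rfl

theorem pv_keyOf_choice_some (categories : List (String × String)) (f : String) (i : Nat)
    (h : pvChoice categories f = some i) (hi : i < categories.length) :
    pvKeyOf categories f = (categories[i]'hi).1 := by
  unfold pvKeyOf
  rw [pv_find?_eq_findIdx?]
  unfold pvChoice at h
  rw [h]
  simp [List.getElem?_eq_getElem hi]

-- B's per-file key is exactly A's
theorem pv_keyB_eq (categories : List (String × String)) (f : String) :
    pvKeyB categories f = pvKeyOf categories f := by
  unfold pvKeyB
  rw [pv_best_eq_choice]
  cases hc : pvChoice categories f with
  | none =>
      rw [pv_keyOf_choice_none categories f hc]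
      rfl
  | some i =>
      have hi := pv_choice_lt categories f i hc
      rw [pv_keyOf_choice_some categories f i hc hi]
      simp only [Option.map_some]
      rw [PySem.List.pyGet?_natCast]
      simp [List.getElem?_eq_getElem (show i < (categories.map (fun c => c.1)).length by simpa using hi)]

-- ===== VERDICT (by name: the statement is the Claim_ definition above) =====
theorem group_files_by_category_spec : Claim_equal_group_files_by_category := by
  intro files categories _hDom
  unfold Spec_group_files_by_category
  show (files.foldl (fun fg f =>
      match categories.find? (fun c => PySem.Str.startswith f c.2) with
      | some c => fg.modify c.1 [] (fun l => l ++ [f])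
      | none   => fg.modify "other_category" [] (fun l => l ++ [f]))
      ((PySem.Dict.ofList (categories.map (fun c => (c.1, ([] : List String))))).insert
        "other_category" [])).items
    = (files.foldl (fun g f => g.modify (pvKeyB categories f) [] (fun l => l ++ [f]))
      ((PySem.Dict.ofList (categories.map (fun c => (c.1, ([] : List String))))).insert
        "other_category" [])).items
  congr 1
  refine PySem.List.foldl_congr_mem _ _ _ _ (fun g f _ => ?_)
  rw [pv_keyB_eq]
  unfold pvKeyOf
  cases categories.find? (fun c => PySem.Str.startswith f c.2) <;> simp
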